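-- pv_equiv track=rewrite | github.com/posl/comment_recommendation | script/mod_gen/2_time/zh/283_D/8.py | solve
-- ===== SOURCE A (Python) =====
-- def solve(s):
--     s = list(s)
--     s.reverse()
--     i = 0
--     count = 0
--     while i < len(s):
--         if s[i] == '0':
--             i += 1
--             count += 1
--         else:
--             j = i
--             while j < len(s):
--                 if s[j] == '0':
--                     break
--                 j += 1
--             if j == len(s):
--                 break
--             else:
--                 count += 1
--                 i = j
--     return count
-- ===== SOURCE B (Python) =====
-- def solve(s):
--     count = 0
--     prev = None
--     for c in s:
--         if c == '0':
--             count += 1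
--         elif prev == '0':
--             count += 1
--         prev = c
--     return count
-- ===== Notes on version B (the rewrite author's own statement) =====
-- stated objective: simpler
-- what changed: Replaces the reverse-and-nested-while scan (inner loop seeking the next zero character) with a single forward pass that counts zero characters plus each non-zero character immediately preceded by a zero.
import Mathlib
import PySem

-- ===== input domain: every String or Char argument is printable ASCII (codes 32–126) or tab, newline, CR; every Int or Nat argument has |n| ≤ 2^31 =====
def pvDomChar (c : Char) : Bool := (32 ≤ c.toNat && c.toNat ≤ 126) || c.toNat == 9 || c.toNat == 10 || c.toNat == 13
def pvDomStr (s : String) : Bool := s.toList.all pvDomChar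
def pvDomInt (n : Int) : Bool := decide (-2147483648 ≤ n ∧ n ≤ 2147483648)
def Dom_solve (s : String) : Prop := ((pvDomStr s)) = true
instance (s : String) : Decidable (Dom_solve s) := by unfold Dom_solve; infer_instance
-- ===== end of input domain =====

-- B is a simpler single forward pass (no reversal, no inner while loop): count '0's plus non-'0' chars preceded by a '0'.

-- ===== PORT A =====
-- inner while loop: scan from j for the next '0'; returns its index, or t.length if none
def solveInner (t : List Char) (j : Nat) : Nat :=
  if h : j < t.length then
    if t[j] = '0' then j else solveInner t (j+1)
  else j
termination_by t.length - j

theorem solveInner_ge (t : List Char) (j : Nat) : j ≤ solveInner t j := by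
  unfold solveInner
  split
  · split
    · exact le_refl _
    · have := solveInner_ge t (j+1); omega
  · exact le_refl _
termination_by t.length - j

-- outer while loop over the reversed list
def solveLoop (t : List Char) (i : Nat) (count : Int) : Int :=
  if h : i < t.length then
    if ht : t[i] = '0' then solveLoop t (i+1) (count+1)
    else
      if hj : solveInner t i = t.length then count
      else solveLoop t (solveInner t i) (count + 1)
  else count
termination_by t.length - i
decreasing_by
  · omega
  · have h1 : solveInner t i = solveInner t (i+1) := by
      rw [solveInner]; simp [h, ht]
    have h2 := solveInner_ge t (i+1)
    omega

def solve (s : String) : Int := solveLoop s.toList.reverse 0 0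

-- ===== PORT B =====
def solve_alt (s : String) : Int :=
  (s.toList.foldl
    (fun (st : Int × Option Char) c =>
      (if c = '0' then st.1 + 1 else if st.2 = some '0' then st.1 + 1 else st.1, some c))
    (0, none)).1

-- ===== PRECONDITION & SPEC =====
def Spec_solve (s : String) (out : Int) : Prop := out = solve_alt s
instance (s : String) (out : Int) : Decidable (Spec_solve s out) := by unfold Spec_solve; infer_instance

-- ===== CLAIM (what is proved, stated in full; the proofs are below) =====
def Claim_equal_solve : Prop := ∀ (s : String), Dom_solve s → Spec_solve s (solve s)

-- ===== LEMMAS AND PROOFS =====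

-- number of '0' characters
def zc : List Char → Int
  | [] => 0
  | c :: r => (if c = '0' then 1 else 0) + zc r

-- number of adjacent pairs (non-'0', '0')
def pc : List Char → Int
  | [] => 0
  | [_] => 0
  | a :: b :: r => (if a ≠ '0' ∧ b = '0' then 1 else 0) + pc (b :: r)

-- number of adjacent pairs ('0', non-'0')
def pairs : List Char → Int
  | [] => 0
  | [_] => 0
  | a :: b :: r => (if a = '0' ∧ b ≠ '0' then 1 else 0) + pairs (b :: r)

-- B's pair count carrying the previous character
def pw : Option Char → List Char → Int
  | _, [] => 0
  | p, c :: r => (if c ≠ '0' ∧ p = some '0' then 1 else 0) + pw (some c) r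

theorem zc_nonzero (l : List Char) (h : ∀ c ∈ l, c ≠ '0') : zc l = 0 := by
  induction l with
  | nil => rfl
  | cons c r ih =>
    simp only [zc]
    rw [if_neg (h c (by simp)), ih (fun x hx => h x (by simp [hx]))]
    ring

theorem pc_zero_cons (r : List Char) : pc ('0' :: r) = pc r := by
  cases r with
  | nil => rfl
  | cons d r' => simp [pc]

theorem pc_nonzero (l : List Char) (h : ∀ c ∈ l, c ≠ '0') : pc l = 0 := by
  induction l with
  | nil => rfl
  | cons a r ih =>
    cases r with
    | nil => rfl
    | cons b r' =>
      simp only [pc]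
      rw [if_neg (by simp [h b (by simp)]), ih (fun x hx => h x (by simp [hx]))]
      ring

theorem zc_split (w : List Char) (r : List Char) (hw : ∀ c ∈ w, c ≠ '0') :
    zc (w ++ r) = zc r := by
  induction w with
  | nil => rfl
  | cons a w' ih =>
    simp only [List.cons_append, zc]
    rw [if_neg (hw a (by simp)), ih (fun x hx => hw x (by simp [hx]))]
    ring

theorem pc_split (w : List Char) (r : List Char) (hne : w ≠ [])
    (hw : ∀ c ∈ w, c ≠ '0') : pc (w ++ '0' :: r) = 1 + pc r := by
  induction w with
  | nil => exact absurd rfl hne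
  | cons a w' ih =>
    cases w' with
    | nil =>
      have ha := hw a (by simp)
      simp [pc, pc_zero_cons, ha]
    | cons b w'' =>
      simp only [List.cons_append, pc]
      rw [if_neg (by simp [hw b (by simp)])]
      have := ih (by simp) (fun x hx => hw x (by simp [hx]))
      simp only [List.cons_append] at this
      rw [this]; ring

theorem dropWhile_head_false {α : Type} {p : α → Bool} (l : List α) {d : α} {r : List α}
    (h : l.dropWhile p = d :: r) : p d = false := by
  induction l with
  | nil => simp [List.dropWhile] at h
  | cons a t ih =>
    rw [List.dropWhile_cons] at h
    by_cases hp : p a = true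
    · rw [if_pos hp] at h; exact ih h
    · rw [if_neg hp] at h
      injection h with h1 h2
      subst h1
      simpa using hp

theorem solveInner_spec (t : List Char) (i : Nat) (h : i ≤ t.length) :
    t.drop (solveInner t i) = (t.drop i).dropWhile (· ≠ '0') ∧ solveInner t i ≤ t.length := by
  rw [solveInner]
  split
  · rename_i hlt
    have hdrop : t.drop i = t[i] :: t.drop (i+1) := List.drop_eq_getElem_cons hlt
    split
    · rename_i h0
      rw [hdrop, List.dropWhile_cons]
      simp [h0]
      omega
    · rename_i h0
      have := solveInner_spec t (i+1) (by omega)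
      rw [hdrop, List.dropWhile_cons]
      simp only [h0, ne_eq, decide_not]
      simpa using this
  · rename_i hge
    have : i = t.length := by omega
    subst this
    simp
termination_by t.length - i

theorem solveLoop_spec (t : List Char) (i : Nat) (c : Int) (h : i ≤ t.length) :
    solveLoop t i c = c + zc (t.drop i) + pc (t.drop i) := by
  rw [solveLoop]
  split
  · rename_i hlt
    have hdrop : t.drop i = t[i] :: t.drop (i+1) := List.drop_eq_getElem_cons hlt
    split
    · rename_i h0
      rw [solveLoop_spec t (i+1) (c+1) (by omega), hdrop, h0]
      simp [zc, pc_zero_cons]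
      ring
    · rename_i h0
      obtain ⟨hdw, hle⟩ := solveInner_spec t i (by omega)
      have hsplit : (t.drop i).takeWhile (· ≠ '0') ++ (t.drop i).dropWhile (· ≠ '0') = t.drop i :=
        List.takeWhile_append_dropWhile
      have htw : ∀ x ∈ (t.drop i).takeWhile (· ≠ '0'), x ≠ '0' := by
        intro x hx
        have := List.mem_takeWhile_imp hx
        simpa using this
      have htwne : (t.drop i).takeWhile (· ≠ '0') ≠ [] := by
        rw [hdrop, List.takeWhile_cons]
        simp [h0]
      split
      · rename_i hj
        -- inner scan found no '0': suffix has none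
        have hnil : (t.drop i).dropWhile (· ≠ '0') = [] := by
          rw [← hdw, hj, List.drop_length]
        rw [← hsplit, hnil, List.append_nil]
        rw [zc_nonzero _ htw, pc_nonzero _ htw]
        ring
      · rename_i hj
        have hlt' : solveInner t i < t.length := by omega
        have hne : (t.drop i).dropWhile (· ≠ '0') ≠ [] := by
          rw [← hdw]
          simp [List.drop_eq_nil_iff]
          omega
        obtain ⟨r', hr'⟩ : ∃ r', (t.drop i).dropWhile (· ≠ '0') = '0' :: r' := by
          cases hh : (t.drop i).dropWhile (· ≠ '0') with
          | nil => exact absurd hh hne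
          | cons d r' =>
            have hd0 := dropWhile_head_false _ hh
            simp at hd0
            exact ⟨r', by rw [hd0]⟩
        have hgt : i < solveInner t i := by
          have h1 : solveInner t i = solveInner t (i+1) := by
            rw [solveInner]; simp [hlt, h0]
          have h2 := solveInner_ge t (i+1)
          omega
        rw [solveLoop_spec t (solveInner t i) (c+1) (by omega)]
        rw [hdw, hr']
        rw [← hsplit, hr', zc_split _ _ htw, pc_split _ _ htwne htw]
        simp [zc, pc_zero_cons]
        ring
  · rename_i hge
    have : i = t.length := by omega
    rw [this, List.drop_length]
    simp [zc, pc]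
termination_by t.length - i
decreasing_by
  · omega
  · omega

theorem foldB_spec (u : List Char) : ∀ (acc : Int) (prev : Option Char),
    (u.foldl
      (fun (st : Int × Option Char) c =>
        (if c = '0' then st.1 + 1 else if st.2 = some '0' then st.1 + 1 else st.1, some c))
      (acc, prev)).1 = acc + zc u + pw prev u := by
  induction u with
  | nil => intro acc prev; simp [zc, pw]
  | cons c r ih =>
    intro acc prev
    simp only [List.foldl_cons, zc, pw]
    rw [ih]
    by_cases h0 : c = '0'
    · simp [h0]; ring
    · by_cases hp : prev = some '0'
      · simp [h0, hp]
        try ring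
      · simp [h0, hp]
        try ring

theorem pw_pairs (u : List Char) : ∀ a, pw (some a) u = pairs (a :: u) := by
  induction u with
  | nil => intro a; rfl
  | cons c r ih =>
    intro a
    simp only [pw, pairs, ih c]
    by_cases h0 : c = '0' <;> by_cases ha : a = '0' <;> simp [h0, ha]

theorem pw_none (u : List Char) : pw none u = pairs u := by
  cases u with
  | nil => rfl
  | cons c r =>
    simp only [pw, pw_pairs r c]
    simp

theorem pc_append (l : List Char) (c : Char) :
    pc (l ++ [c]) = pc l +
      (match l.getLast? with
       | none => 0
       | some a => if a ≠ '0' ∧ c = '0' then 1 else 0) := by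
  induction l with
  | nil => simp [pc]
  | cons a l' ih =>
    cases l' with
    | nil => simp [pc]
    | cons b l'' =>
      simp only [List.cons_append, pc]
      rw [← List.cons_append, ih, List.getLast?_cons_cons]
      ring

theorem pairs_reverse (u : List Char) : pc u.reverse = pairs u := by
  induction u with
  | nil => rfl
  | cons c r ih =>
    rw [List.reverse_cons, pc_append, ih, List.getLast?_reverse]
    cases r with
    | nil => rfl
    | cons d r' =>
      simp only [List.head?_cons, pairs]
      have : ((if d ≠ '0' ∧ c = '0' then (1:Int) else 0)) =
             ((if c = '0' ∧ d ≠ '0' then (1:Int) else 0)) := by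
        by_cases h1 : d = '0' <;> by_cases h2 : c = '0' <;> simp [h1, h2]
      rw [this]; ring

theorem zc_reverse (u : List Char) : zc u.reverse = zc u := by
  induction u with
  | nil => rfl
  | cons c r ih =>
    rw [List.reverse_cons]
    have happ : ∀ (l : List Char), zc (l ++ [c]) = zc l + (if c = '0' then 1 else 0) := by
      intro l
      induction l with
      | nil => simp [zc]
      | cons a l' ih2 => simp only [List.cons_append, zc, ih2]; ring
    rw [happ, ih]
    simp only [zc]
    ring

-- ===== VERDICT (by name: the statement is the Claim_ definition above) =====
theorem solve_spec : Claim_equal_solve := by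
  intro s _
  unfold Spec_solve solve solve_alt
  rw [solveLoop_spec _ 0 0 (by omega)]
  rw [foldB_spec]
  simp only [List.drop_zero, pw_none, ← pairs_reverse, zc_reverse]
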